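-- pv_equiv track=rewrite | github.com/TheJacksonLaboratory/gtfmerge | output1.py | filter_map
-- ===== SOURCE A (Python) =====
-- def filter_map(primary_filter, secondary_filter, output_filter):
--
--     """
--     Inputs:
--       primary_filter: {filtered_primary_id: kept_primary_id, ...}
--       secondary_filter: {filtered_secondary_id: kept_secondary_id, ... }
--       output_filter: {filtered_secondary_id: kept_primary_id, ... }
--
--     Output: { filter_id: [filter_db, kept_db, kept_id], ... }
--     """
--
--     mappings = {}    ## { filter_id: [filter_db, kept_db, kept_id], ... }
--
--     for filtered_id in primary_filter:
--
--         kept_id = primary_filter[filtered_id]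
--         while kept_id in primary_filter:
--             kept_id = primary_filter[kept_id]
--
--         ## sourcedb, xrefdb, xref_id
--         mappings[filtered_id] = [1, 1, kept_id]
--
--     for filtered_id in secondary_filter:
--
--         kept_id = secondary_filter[filtered_id]
--         while kept_id in primary_filter:
--             kept_id = secondary_filter[kept_id]
--
--         mappings[filtered_id] = [2, 2, kept_id]
--
--     for filtered_id in output_filter:
--
--         kept_id = output_filter[filtered_id]
--         mappings[filtered_id] = [2, 1, kept_id]
--
--     return mappings
-- ===== SOURCE B (Python) =====
-- def filter_map(primary_filter, secondary_filter, output_filter):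
--     """Same mapping as A, but chain resolution is memoized with path
--     compression: each id's final kept id is computed once and reused."""
--     mappings = {}
--     memo1 = {}
--     memo2 = {}
--
--     def resolve(start, step_map, memo):
--         # Follow x -> step_map[x] while x is a primary key, stopping early
--         # at a memoized id; then write the result back along the path.
--         x = start
--         path = []
--         while x in primary_filter and x not in memo:
--             path.append(x)
--             x = step_map[x]
--         r = memo.get(x, x)
--         for y in path:
--             memo[y] = r
--         return r
--
--     for k in primary_filter:
--         mappings[k] = [1, 1, resolve(k, primary_filter, memo1)]
--     for k in secondary_filter:
--         mappings[k] = [2, 2, resolve(secondary_filter[k], secondary_filter, memo2)]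
--     for k, v in output_filter.items():
--         mappings[k] = [2, 1, v]
--     return mappings
-- ===== Notes on version B (the rewrite author's own statement) =====
-- stated objective: alternative
-- what changed: B replaces A's per-key chain re-walk by a memoized resolver with path compression (a shared memo per loop), so each id's kept id is computed once and reused instead of re-walking the chain for every key.
import Mathlib
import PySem

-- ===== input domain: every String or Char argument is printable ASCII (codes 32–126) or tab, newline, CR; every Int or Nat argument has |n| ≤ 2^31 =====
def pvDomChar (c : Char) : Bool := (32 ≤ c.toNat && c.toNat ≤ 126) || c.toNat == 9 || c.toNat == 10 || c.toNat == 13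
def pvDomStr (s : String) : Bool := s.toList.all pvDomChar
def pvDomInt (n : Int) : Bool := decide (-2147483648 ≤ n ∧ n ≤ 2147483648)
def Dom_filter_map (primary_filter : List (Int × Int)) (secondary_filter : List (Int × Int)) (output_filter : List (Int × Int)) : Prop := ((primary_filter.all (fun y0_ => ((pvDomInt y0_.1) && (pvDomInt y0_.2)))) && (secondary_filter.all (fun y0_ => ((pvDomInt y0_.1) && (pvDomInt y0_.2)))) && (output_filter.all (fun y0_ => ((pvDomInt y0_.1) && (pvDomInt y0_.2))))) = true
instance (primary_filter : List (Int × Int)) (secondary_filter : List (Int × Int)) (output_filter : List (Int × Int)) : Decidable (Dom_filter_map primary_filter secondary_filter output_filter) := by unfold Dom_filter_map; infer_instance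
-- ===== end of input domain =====

-- B replaces A's per-key chain walk by memoized resolution with path compression:
-- each id's kept id is computed once and reused across keys.

-- ===== PORT A =====
-- A's while-loop 'kept = start; while kept in test: kept = step[kept]', fuel-bounded;
-- under Pre_ the loop exits within test.keys.length steps, so the fuel is never exhausted
-- and the getD default is never used (Python would raise KeyError exactly where the
-- chain gets stuck, and those inputs are outside Pre_).
def pvChase (test step : PySem.Dict Int Int) : Nat → Int → Int
  | 0, x => x
  | f + 1, x => if test.contains x then pvChase test step f (step.getD x x) else x

def filter_map (primary_filter : List (Int × Int)) (secondary_filter : List (Int × Int)) (output_filter : List (Int × Int)) : List (Int × List Int) :=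
  let dp := PySem.Dict.ofList primary_filter
  let ds := PySem.Dict.ofList secondary_filter
  let dq := PySem.Dict.ofList output_filter
  let m1 := dp.keys.foldl (fun m k => m.insert k [1, 1, pvChase dp dp (dp.keys.length + 1) (dp.getD k 0)]) PySem.Dict.empty
  let m2 := ds.keys.foldl (fun m k => m.insert k [2, 2, pvChase dp ds (dp.keys.length + 1) (ds.getD k 0)]) m1
  let m3 := dq.keys.foldl (fun m k => m.insert k [2, 1, dq.getD k 0]) m2
  m3.items

-- ===== PORT B =====
-- B's inner while: walk while x is a primary key AND not memoized, recording the path.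
def pvBloop (test step memo : PySem.Dict Int Int) : Nat → Int → List Int → Int × List Int
  | 0, x, path => (x, path)
  | f + 1, x, path =>
    if test.contains x && !(memo.contains x) then
      pvBloop test step memo f (step.getD x x) (path ++ [x])
    else (x, path)

-- B's resolve: run the walk, read the result (memo hit or the escaped id),
-- then write it back along the recorded path (path compression).
def pvResolve (test step memo : PySem.Dict Int Int) (start : Int) : Int × PySem.Dict Int Int :=
  let p := pvBloop test step memo (test.keys.length + 1) start []
  let r := memo.getD p.1 p.1
  (r, p.2.foldl (fun m y => m.insert y r) memo)

def filter_map_alt (primary_filter : List (Int × Int)) (secondary_filter : List (Int × Int)) (output_filter : List (Int × Int)) : List (Int × List Int) :=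
  let dp := PySem.Dict.ofList primary_filter
  let ds := PySem.Dict.ofList secondary_filter
  let dq := PySem.Dict.ofList output_filter
  let s1 := dp.keys.foldl
    (fun (acc : PySem.Dict Int (List Int) × PySem.Dict Int Int) k =>
      let pr := pvResolve dp dp acc.2 k
      (acc.1.insert k [1, 1, pr.1], pr.2))
    (PySem.Dict.empty, PySem.Dict.empty)
  let s2 := ds.keys.foldl
    (fun (acc : PySem.Dict Int (List Int) × PySem.Dict Int Int) k =>
      let pr := pvResolve dp ds acc.2 (ds.getD k 0)
      (acc.1.insert k [2, 2, pr.1], pr.2))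
    (s1.1, PySem.Dict.empty)
  let m3 := dq.items.foldl (fun (m : PySem.Dict Int (List Int)) kv => m.insert kv.1 [2, 1, kv.2]) s2.1
  m3.items

-- ===== PRECONDITION & SPEC =====
def pvStep (step : PySem.Dict Int Int) (x : Int) : Int := step.getD x x

-- "the chain from x leaves the primary keys within |primary| steps" — by pigeonhole this
-- bound is forced (the in-key points of a terminating chain are distinct), so pvEsc is
-- exactly 'A's while-loop terminates without KeyError' (a stuck lookup self-loops in pvStep).
def pvEsc (test step : PySem.Dict Int Int) (x : Int) : Prop :=
  ∃ m ∈ List.range (test.keys.length + 1), test.contains ((pvStep step)^[m] x) = false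

-- Pre_ excludes exactly the inputs where A raises KeyError (a secondary chain stuck on a
-- primary key with no secondary entry) or diverges (a cycle); B does the same there.
def Pre_filter_map (primary_filter : List (Int × Int)) (secondary_filter : List (Int × Int)) (output_filter : List (Int × Int)) : Prop :=
  (∀ k ∈ (PySem.Dict.ofList primary_filter : PySem.Dict Int Int).keys,
     pvEsc (PySem.Dict.ofList primary_filter) (PySem.Dict.ofList primary_filter)
       ((PySem.Dict.ofList primary_filter : PySem.Dict Int Int).getD k 0)) ∧
  (∀ k ∈ (PySem.Dict.ofList secondary_filter : PySem.Dict Int Int).keys,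
     pvEsc (PySem.Dict.ofList primary_filter) (PySem.Dict.ofList secondary_filter)
       ((PySem.Dict.ofList secondary_filter : PySem.Dict Int Int).getD k 0))

instance (primary_filter : List (Int × Int)) (secondary_filter : List (Int × Int)) (output_filter : List (Int × Int)) : Decidable (Pre_filter_map primary_filter secondary_filter output_filter) := by unfold Pre_filter_map pvEsc; infer_instance

def pvWitness_filter_map : (List (Int × Int)) × (List (Int × Int)) × (List (Int × Int)) :=
  ([(1, 2), (2, 3)], [(10, 11)], [(5, 7)])

def Spec_filter_map (primary_filter : List (Int × Int)) (secondary_filter : List (Int × Int)) (output_filter : List (Int × Int)) (out : List (Int × List Int)) : Prop := out = filter_map_alt primary_filter secondary_filter output_filter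
instance (primary_filter : List (Int × Int)) (secondary_filter : List (Int × Int)) (output_filter : List (Int × Int)) (out : List (Int × List Int)) : Decidable (Spec_filter_map primary_filter secondary_filter output_filter out) := by unfold Spec_filter_map; infer_instance

-- ===== CLAIM (what is proved, stated in full; the proofs are below) =====
def Claim_equal_filter_map : Prop := ∀ (primary_filter : List (Int × Int)) (secondary_filter : List (Int × Int)) (output_filter : List (Int × Int)), Dom_filter_map primary_filter secondary_filter output_filter → Pre_filter_map primary_filter secondary_filter output_filter → Spec_filter_map primary_filter secondary_filter output_filter (filter_map primary_filter secondary_filter output_filter)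

-- ===== LEMMAS AND PROOFS =====

-- 'the walk from x has exited by fuel f'
def pvDone (test step : PySem.Dict Int Int) (f : Nat) (x : Int) : Prop :=
  test.contains (pvChase test step f x) = false

-- memo invariant: every memo entry records the walk's true result
def pvInv (test step : PySem.Dict Int Int) (N : Nat) (memo : PySem.Dict Int Int) : Prop :=
  ∀ y r, memo.get? y = some r →
    test.contains y = true ∧ pvDone test step N y ∧ pvChase test step N y = r

theorem pvChase_not {test step : PySem.Dict Int Int} {x : Int}
    (h : test.contains x = false) : ∀ f, pvChase test step f x = x := by
  intro f; cases f <;> simp [pvChase, h]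

theorem pvChase_succ {test step : PySem.Dict Int Int} {x : Int} {f : Nat}
    (h : test.contains x = true) :
    pvChase test step (f + 1) x = pvChase test step f (pvStep step x) := by
  simp [pvChase, h, pvStep]

theorem pvChase_succ_of_done {test step : PySem.Dict Int Int} :
    ∀ {f : Nat} {x : Int}, pvDone test step f x →
      pvChase test step (f + 1) x = pvChase test step f x := by
  intro f
  induction f with
  | zero =>
    intro x hd
    simp only [pvDone, pvChase] at hd ⊢
    simp [hd]
  | succ f ih =>
    intro x hd
    by_cases h : test.contains x = true
    · rw [pvChase_succ h, pvChase_succ h]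
      rw [pvDone, pvChase_succ h] at hd
      exact ih hd
    · simp only [Bool.not_eq_true] at h
      rw [pvChase_not h, pvChase_not h]

theorem pvDone_succ {test step : PySem.Dict Int Int} {f : Nat} {x : Int}
    (hd : pvDone test step f x) : pvDone test step (f + 1) x := by
  rw [pvDone, pvChase_succ_of_done hd]; exact hd

theorem pvChase_le_eq {test step : PySem.Dict Int Int} {f : Nat} {x : Int}
    (hd : pvDone test step f x) : ∀ {g : Nat}, f ≤ g → pvChase test step g x = pvChase test step f x := by
  intro g hg
  induction g, hg using Nat.le_induction with
  | base => rfl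
  | succ g hg ih =>
    have hdg : pvDone test step g x := by rw [pvDone, ih]; exact hd
    rw [pvChase_succ_of_done hdg, ih]

theorem pvChase_done_done {test step : PySem.Dict Int Int} {f g : Nat} {x : Int}
    (hf : pvDone test step f x) (hg : pvDone test step g x) :
    pvChase test step f x = pvChase test step g x := by
  rcases le_total f g with h | h
  · rw [pvChase_le_eq hf h]
  · rw [pvChase_le_eq hg h]

theorem pvDone_of_iter {test step : PySem.Dict Int Int} :
    ∀ {f : Nat} {x : Int} {m : Nat}, m ≤ f →
      test.contains ((pvStep step)^[m] x) = false → pvDone test step f x := by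
  intro f
  induction f with
  | zero =>
    intro x m hm h
    interval_cases m
    simpa [pvDone, pvChase] using h
  | succ f ih =>
    intro x m hm h
    by_cases hc : test.contains x = true
    · cases m with
      | zero => simp at h; rw [h] at hc; exact absurd hc (by simp)
      | succ m =>
        rw [Function.iterate_succ_apply] at h
        have := ih (Nat.le_of_succ_le_succ hm) h
        rw [pvDone, pvChase_succ hc]
        exact this
    · simp only [Bool.not_eq_true] at hc
      rw [pvDone, pvChase_not hc]; exact hc

theorem pvBloop_spec {test step memo : PySem.Dict Int Int} {N : Nat}
    (hInv : pvInv test step N memo) :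
    ∀ (f : Nat) (x : Int) (path : List Int), pvDone test step f x →
      memo.getD (pvBloop test step memo f x path).1 (pvBloop test step memo f x path).1
        = pvChase test step f x
      ∧ ∀ y ∈ (pvBloop test step memo f x path).2, y ∈ path ∨
          (test.contains y = true ∧ pvDone test step f y ∧
            pvChase test step f y = pvChase test step f x) := by
  intro f
  induction f with
  | zero =>
    intro x path hd
    simp only [pvDone, pvChase] at hd
    have hnone : memo.get? x = none := by
      cases hg : memo.get? x with
      | none => rfl
      | some r => exact absurd (hInv x r hg).1 (by simp [hd])
    refine ⟨?_, fun y hy => Or.inl hy⟩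
    simp [pvBloop, pvChase, PySem.Dict.getD_eq_get?_getD, hnone]
  | succ f ih =>
    intro x path hd
    by_cases hc : (test.contains x && !(memo.contains x)) = true
    · have hcx : test.contains x = true := by
        revert hc; cases test.contains x <;> simp
      have hstep : pvBloop test step memo (f + 1) x path
          = pvBloop test step memo f (step.getD x x) (path ++ [x]) := by
        simp [pvBloop, hc]
      have hφ : step.getD x x = pvStep step x := rfl
      have hdf : pvDone test step f (pvStep step x) := by
        rw [pvDone, ← pvChase_succ hcx]; exact hd
      obtain ⟨h1, h2⟩ := ih (pvStep step x) (path ++ [x]) hdf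
      rw [hstep, hφ]
      refine ⟨by rw [h1, pvChase_succ hcx], ?_⟩
      intro y hy
      rcases h2 y hy with hmem | ⟨hcy, hdy, hey⟩
      · rcases List.mem_append.mp hmem with hmem | hmem
        · exact Or.inl hmem
        · have hyx : y = x := by simpa using hmem
          subst hyx
          exact Or.inr ⟨hcx, hd, rfl⟩
      · refine Or.inr ⟨hcy, pvDone_succ hdy, ?_⟩
        rw [pvChase_succ_of_done hdy, hey, ← pvChase_succ hcx]
    · have hret : pvBloop test step memo (f + 1) x path = (x, path) := by
        have hcf : (test.contains x && !(memo.contains x)) = false :=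
          Bool.not_eq_true _ ▸ Bool.of_not_eq_true hc
        simp [pvBloop, hcf]
      rw [hret]
      refine ⟨?_, fun y hy => Or.inl hy⟩
      simp only []
      by_cases hcx : test.contains x = true
      · -- memo hit
        have hm : memo.contains x = true := by
          by_contra hnm
          simp only [Bool.not_eq_true] at hnm
          simp [hcx, hnm] at hc
        have : (memo.get? x).isSome := by
          rw [← PySem.Dict.contains_eq_isSome_get?]; exact hm
        obtain ⟨r, hr⟩ := Option.isSome_iff_exists.mp this
        obtain ⟨_, hdN, heN⟩ := hInv x r hr
        rw [PySem.Dict.getD_eq_get?_getD, hr]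
        simpa using (heN ▸ pvChase_done_done hdN hd)
      · simp only [Bool.not_eq_true] at hcx
        have hnone : memo.get? x = none := by
          cases hg : memo.get? x with
          | none => rfl
          | some r => exact absurd (hInv x r hg).1 (by simp [hcx])
        rw [PySem.Dict.getD_eq_get?_getD, hnone, pvChase_not hcx]
        rfl

theorem pvInv_fold {test step : PySem.Dict Int Int} {N : Nat} {r : Int} :
    ∀ (l : List Int) (memo : PySem.Dict Int Int), pvInv test step N memo →
      (∀ y ∈ l, test.contains y = true ∧ pvDone test step N y ∧ pvChase test step N y = r) →
      pvInv test step N (l.foldl (fun m y => m.insert y r) memo) := by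
  intro l
  induction l with
  | nil => intro memo hi _; exact hi
  | cons y0 l ih =>
    intro memo hi hl
    simp only [List.foldl_cons]
    refine ih _ ?_ (fun y hy => hl y (List.mem_cons_of_mem _ hy))
    intro y rv hget
    rw [PySem.Dict.get?_insert] at hget
    split_ifs at hget with he
    · subst he
      obtain ⟨h1, h2, h3⟩ := hl y (List.mem_cons_self)
      exact ⟨h1, h2, by rw [h3]; exact Option.some.inj hget⟩
    · exact hi y rv hget

theorem pvResolve_spec {test step memo : PySem.Dict Int Int}
    (hInv : pvInv test step N memo)
    {start : Int} (hd : pvDone test step (test.keys.length + 1) start)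
    (hN : N = test.keys.length + 1) :
    (pvResolve test step memo start).1 = pvChase test step (test.keys.length + 1) start
    ∧ pvInv test step N (pvResolve test step memo start).2 := by
  subst hN
  obtain ⟨h1, h2⟩ := pvBloop_spec hInv (test.keys.length + 1) start [] hd
  constructor
  · simpa [pvResolve] using h1
  · simp only [pvResolve]
    refine pvInv_fold _ _ hInv ?_
    intro y hy
    rcases h2 y hy with h | ⟨hcy, hdy, hey⟩
    · simp at h
    · exact ⟨hcy, hdy, by rw [hey, ← h1]⟩

-- the generic loop: A's fold (inserting the chased value) equals the first component of
-- B's fold (resolving with the shared memo), provided every start's walk terminates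
theorem pvLoop_eq {test step : PySem.Dict Int Int} {a b : Int} {start : Int → Int} :
    ∀ (l : List Int) (m : PySem.Dict Int (List Int)) (memo : PySem.Dict Int Int),
      pvInv test step (test.keys.length + 1) memo →
      (∀ k ∈ l, pvDone test step (test.keys.length + 1) (start k)) →
      l.foldl (fun mm k => mm.insert k [a, b, pvChase test step (test.keys.length + 1) (start k)]) m
        = (l.foldl (fun acc k =>
            let pr := pvResolve test step acc.2 (start k)
            (acc.1.insert k [a, b, pr.1], pr.2)) (m, memo)).1 := by
  intro l
  induction l with
  | nil => intro m memo _ _; rfl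
  | cons k l ih =>
    intro m memo hInv hall
    obtain ⟨h1, h2⟩ := pvResolve_spec (memo := memo) hInv (hall k List.mem_cons_self) rfl
    simp only [List.foldl_cons, h1.symm]
    exact ih _ _ h2 (fun k' hk' => hall k' (List.mem_cons_of_mem _ hk'))

theorem pvGetD_default_irrel {d : PySem.Dict Int Int} {k : Int}
    (h : d.contains k = true) (a b : Int) : d.getD k a = d.getD k b := by
  have : (d.get? k).isSome := by rw [← PySem.Dict.contains_eq_isSome_get?]; exact h
  obtain ⟨v, hv⟩ := Option.isSome_iff_exists.mp this
  rw [PySem.Dict.getD_eq_get?_getD, PySem.Dict.getD_eq_get?_getD, hv]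
  rfl

-- ===== VERDICT (by name: the statement is the Claim_ definition above) =====
theorem filter_map_spec : Claim_equal_filter_map := by
  intro p s o _hDom hPre
  unfold Spec_filter_map filter_map filter_map_alt
  obtain ⟨hp, hs⟩ := hPre
  set dp := (PySem.Dict.ofList p : PySem.Dict Int Int) with hdp
  set ds := (PySem.Dict.ofList s : PySem.Dict Int Int) with hds
  set dq := (PySem.Dict.ofList o : PySem.Dict Int Int) with hdq
  set N := dp.keys.length + 1 with hN
  -- Done facts from Pre_
  have hdone1 : ∀ k ∈ dp.keys, pvDone dp dp N (dp.getD k 0) := by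
    intro k hk
    obtain ⟨m, hm, hesc⟩ := hp k hk
    exact pvDone_of_iter (by have := List.mem_range.mp hm; omega) hesc
  have hdone2 : ∀ k ∈ ds.keys, pvDone dp ds N (ds.getD k 0) := by
    intro k hk
    obtain ⟨m, hm, hesc⟩ := hs k hk
    exact pvDone_of_iter (by have := List.mem_range.mp hm; omega) hesc
  -- loop 1: A chases from dp[k], B resolves from k; for k ∈ dp.keys these agree
  have hchase1 : ∀ k ∈ dp.keys, pvChase dp dp N (dp.getD k 0) = pvChase dp dp N k := by
    intro k hk
    have hck : dp.contains k = true := (PySem.Dict.contains_iff_mem_keys dp k).mpr hk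
    have hNpos : N = dp.keys.length + 1 := hN
    have : pvChase dp dp N k = pvChase dp dp dp.keys.length (pvStep dp k) := by
      rw [hNpos]; exact pvChase_succ hck
    have hstepk : pvStep dp k = dp.getD k 0 := pvGetD_default_irrel hck k 0
    have hdsub : pvDone dp dp dp.keys.length (dp.getD k 0) := by
      obtain ⟨m, hm, hesc⟩ := hp k hk
      exact pvDone_of_iter (by simpa using Nat.lt_succ_iff.mp (List.mem_range.mp hm)) hesc
    rw [this, hstepk, hN, pvChase_succ_of_done hdsub]
  have hdone1' : ∀ k ∈ dp.keys, pvDone dp dp N k := by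
    intro k hk
    have := hdone1 k hk
    rw [pvDone, ← hchase1 k hk]
    exact this
  have hInv0 : pvInv dp dp N PySem.Dict.empty := by
    intro y r hget; simp [PySem.Dict.get?_empty] at hget
  have hInv0' : pvInv dp ds N PySem.Dict.empty := by
    intro y r hget; simp [PySem.Dict.get?_empty] at hget
  -- rewrite A's loop-1 body to chase from k itself, then apply the generic loop lemma
  have hl1 : dp.keys.foldl (fun m k => m.insert k [1, 1, pvChase dp dp N (dp.getD k 0)]) PySem.Dict.empty
      = dp.keys.foldl (fun m k => m.insert k [1, 1, pvChase dp dp N k]) PySem.Dict.empty := by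
    apply PySem.List.foldl_congr_mem
    intro m k hk
    rw [hchase1 k hk]
  have h1 := pvLoop_eq (test := dp) (step := dp) (a := 1) (b := 1) (start := id)
      dp.keys PySem.Dict.empty PySem.Dict.empty hInv0 (fun k hk => hdone1' k hk)
  have h2 := pvLoop_eq (test := dp) (step := ds) (a := 2) (b := 2) (start := fun k => ds.getD k 0)
      ds.keys (dp.keys.foldl (fun m k => m.insert k [1, 1, pvChase dp dp N k]) PySem.Dict.empty)
      PySem.Dict.empty hInv0' (fun k hk => hdone2 k hk)
  -- loop 3: A folds over keys with getD; B folds over items — equal since keys are nodup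
  have hq : dq.items = dq.keys.map (fun k => (k, dq.getD k 0)) :=
    PySem.Dict.items_eq_map_keys dq (PySem.Dict.nodup_keys_ofList o) 0
  simp only [hN] at h1 h2 hl1 ⊢
  simp only [id] at h1
  rw [hl1, h2, h1, hq, List.foldl_map]
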